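-- pv_equiv track=rewrite | github.com/sakther/mORAL | models/smooth_outputs_and_constract_episodes.py | smooth_output
-- ===== SOURCE A (Python) =====
-- def smooth_output(T, D, Y):
--     Tn = list(T)
--     dur = list(D)
--     Yin = [v for v in list(Y)]
--     Yout = [0 for _ in list(Y)]
--
--     i = 0
--
--     while i < len(Yin):
--         if Yin[i] == 1:
--             j = i + 1
--             cur_dur = dur[i]
--             while Tn[i] <= Tn[j] <= Tn[i] + dur[i] + 90:
--                 if Yin[j] == 1:
--                     cur_dur += dur[j]
--                 j += 1
--             if cur_dur >= 45:
--                 for k in range(i, j):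
--                     Yout[k] = Yin[k]
--                 i += 1
--             else:
--                 i += 1
--         else:
--             i += 1
--     return Yout
-- ===== SOURCE B (Python) =====
-- def smooth_output(T, D, Y):
--     n = len(Y)
--     # masked prefix sums of durations at label-1 positions: pref[k] = sum of D[j] for j < k with Y[j] == 1
--     pref = [0]
--     s = 0
--     for j in range(n):
--         s += D[j] if Y[j] == 1 else 0
--         pref.append(s)
--     # collect qualifying windows (i, end) in one pass, window sum via prefix sums
--     windows = []
--     for i in range(n):
--         if Y[i] == 1:
--             j = i + 1
--             while j < n and T[i] <= T[j] <= T[i] + D[i] + 90: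
--                 j += 1
--             if D[i] + pref[j] - pref[i + 1] >= 45:
--                 windows.append((i, j))
--     # output: copy Y inside the union of qualifying windows, zero elsewhere
--     return [Y[k] if any(a <= k < b for a, b in windows) else 0 for k in range(n)]
-- ===== Notes on version B (the rewrite author's own statement) =====
-- stated objective: alternative
-- what changed: B replaces A's stateful sweep (per-window duration re-accumulation and repeated in-place rewrites of overlapping windows) by a two-phase plan: masked prefix sums of durations computed once, a single pass collecting qualifying windows, and a declarative output that copies Y inside the union of those windows and zeros elsewhere.
import Mathlib
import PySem

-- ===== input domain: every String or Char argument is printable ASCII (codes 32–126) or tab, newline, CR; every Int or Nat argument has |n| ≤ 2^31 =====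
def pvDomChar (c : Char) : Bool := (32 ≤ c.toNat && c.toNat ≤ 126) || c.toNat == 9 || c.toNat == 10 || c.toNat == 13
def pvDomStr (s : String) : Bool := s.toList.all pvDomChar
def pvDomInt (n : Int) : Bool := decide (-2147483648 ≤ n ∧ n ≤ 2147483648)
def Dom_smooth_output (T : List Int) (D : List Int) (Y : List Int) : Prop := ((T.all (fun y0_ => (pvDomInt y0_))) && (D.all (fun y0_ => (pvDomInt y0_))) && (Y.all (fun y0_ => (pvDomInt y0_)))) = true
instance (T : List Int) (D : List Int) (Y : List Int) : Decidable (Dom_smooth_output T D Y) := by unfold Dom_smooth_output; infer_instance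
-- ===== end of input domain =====

-- B re-implements A's duration-weighted smoothing as two phases (masked prefix sums + window
-- collection, then a declarative paint of the union of windows) instead of A's stateful sweep
-- with in-window re-accumulation and repeated rewrites; equivalence is proved on Pre_, which is
-- exactly the set of inputs where A returns (elsewhere A raises IndexError).

-- ===== PORT A =====
-- inner 'while Tn[i] <= Tn[j] <= Tn[i] + dur[i] + 90' loop: returns (j, cur_dur);
-- a none lookup of T[j] is Python's IndexError, excluded by Pre_ (the loop then just stops).
def aInner (T : List Int) (D : List Int) (Y : List Int) (ti di : Int) : Nat → Nat → Int → Nat × Int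
  | 0, j, cur => (j, cur)
  | fuel+1, j, cur =>
    match T[j]? with
    | none => (j, cur)
    | some tj =>
      if ti ≤ tj ∧ tj ≤ ti + di + 90 then
        aInner T D Y ti di fuel (j+1) (if Y.getD j 0 = 1 then cur + D.getD j 0 else cur)
      else (j, cur)

-- 'for k in range(i, j): Yout[k] = Yin[k]'
def aWrite (Y : List Int) (out : List Int) (i j : Nat) : List Int :=
  (List.range' i (j - i)).foldl (fun o k => o.set k (Y.getD k 0)) out

-- outer 'while i < len(Yin)' loop
def aOuter (T : List Int) (D : List Int) (Y : List Int) : Nat → Nat → List Int → List Int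
  | 0, _, out => out
  | fuel+1, i, out =>
    if i < Y.length then
      if Y.getD i 0 = 1 then
        let p := aInner T D Y (T.getD i 0) (D.getD i 0) T.length (i+1) (D.getD i 0)
        aOuter T D Y fuel (i+1) (if 45 ≤ p.2 then aWrite Y out i p.1 else out)
      else aOuter T D Y fuel (i+1) out
    else out

def smooth_output (T : List Int) (D : List Int) (Y : List Int) : List Int :=
  aOuter T D Y Y.length 0 (Y.map (fun _ => 0))

-- ===== PORT B =====
-- 'pref' list of Source B: masked prefix sums, built left to right with a running sum
def bPref (D : List Int) (Y : List Int) : Nat → Nat → Int → List Int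
  | 0, _, _ => []
  | fuel+1, j, s =>
    let s' := s + (if Y.getD j 0 = 1 then D.getD j 0 else 0)
    s' :: bPref D Y fuel (j+1) s'

-- 'while j < n and T[i] <= T[j] <= T[i] + D[i] + 90': window end only, no accumulation
def bEnd (T : List Int) (n : Nat) (ti di : Int) : Nat → Nat → Nat
  | 0, j => j
  | fuel+1, j =>
    if j < n then
      if ti ≤ T.getD j 0 ∧ T.getD j 0 ≤ ti + di + 90 then bEnd T n ti di fuel (j+1) else j
    else j

def smooth_output_alt (T : List Int) (D : List Int) (Y : List Int) : List Int :=
  let n := Y.length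
  let pref := 0 :: bPref D Y n 0 0
  let windows := (List.range n).foldl (fun acc i =>
    if Y.getD i 0 = 1 then
      let e := bEnd T n (T.getD i 0) (D.getD i 0) n (i+1)
      if 45 ≤ D.getD i 0 + pref.getD e 0 - pref.getD (i+1) 0 then acc ++ [(i, e)] else acc
    else acc) ([] : List (Nat × Nat))
  (List.range n).map (fun k => if windows.any (fun p => decide (p.1 ≤ k ∧ k < p.2)) then Y.getD k 0 else 0)

-- ===== PRECONDITION & SPEC =====
-- Pre_ is exactly the set of inputs on which the Python A returns: every position labelled 1 must
-- be indexable in T and D, and its window scan must hit an index (within T, at most len(Y)) whose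
-- timestamp falls outside the window — otherwise A's inner while runs off the list and raises IndexError.
def Pre_smooth_output (T : List Int) (D : List Int) (Y : List Int) : Prop :=
  ∀ i < Y.length, Y.getD i 0 = 1 →
    i < T.length ∧ i < D.length ∧
    ∃ j < T.length, i < j ∧ j ≤ Y.length ∧
      ¬(T.getD i 0 ≤ T.getD j 0 ∧ T.getD j 0 ≤ T.getD i 0 + D.getD i 0 + 90)

instance (T : List Int) (D : List Int) (Y : List Int) : Decidable (Pre_smooth_output T D Y) := by
  unfold Pre_smooth_output; infer_instance

def pvWitness_smooth_output : List Int × List Int × List Int := ([0, 200], [50, 1], [1, 0])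

def Spec_smooth_output (T : List Int) (D : List Int) (Y : List Int) (out : List Int) : Prop := out = smooth_output_alt T D Y
instance (T : List Int) (D : List Int) (Y : List Int) (out : List Int) : Decidable (Spec_smooth_output T D Y out) := by unfold Spec_smooth_output; infer_instance

-- ===== CLAIM (what is proved, stated in full; the proofs are below) =====
def Claim_equal_smooth_output : Prop := ∀ (T : List Int) (D : List Int) (Y : List Int), Dom_smooth_output T D Y → Pre_smooth_output T D Y → Spec_smooth_output T D Y (smooth_output T D Y)

-- ===== LEMMAS AND PROOFS =====

-- the masked duration at index j, and its prefix sums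
def pvMask (D : List Int) (Y : List Int) (j : Nat) : Int :=
  if Y.getD j 0 = 1 then D.getD j 0 else 0

def pvMsum (D : List Int) (Y : List Int) : Nat → Int
  | 0 => 0
  | k+1 => pvMsum D Y k + pvMask D Y k

-- window end of position i (B's loop, full fuel)
def pvE (T : List Int) (D : List Int) (Y : List Int) (i : Nat) : Nat :=
  bEnd T Y.length (T.getD i 0) (D.getD i 0) Y.length (i+1)

-- "position k is covered by the qualifying window started at i"
def pvCov (T : List Int) (D : List Int) (Y : List Int) (i k : Nat) : Bool :=
  (Y.getD i 0 == 1) &&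
  decide (45 ≤ D.getD i 0 + (pvMsum D Y (pvE T D Y i) - pvMsum D Y (i+1))) &&
  decide (i ≤ k) && decide (k < pvE T D Y i)

-- the intended value of output position k after the first i outer iterations
def pvChi (T : List Int) (D : List Int) (Y : List Int) (i k : Nat) : Int :=
  if (List.range i).any (fun i' => pvCov T D Y i' k) then Y.getD k 0 else 0

theorem pv_cov_lt {T D Y : List Int} {i k : Nat} (h : pvCov T D Y i k = true) : i < Y.length := by
  by_contra hlen
  push Not at hlen
  simp only [pvCov, Bool.and_eq_true, beq_iff_eq] at h
  rw [List.getD_eq_default _ _ hlen] at h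
  exact absurd h.1.1.1 (by norm_num)

theorem pv_bEnd_lb (T : List Int) (n : Nat) (ti di : Int) :
    ∀ fuel j, j ≤ bEnd T n ti di fuel j := by
  intro fuel
  induction fuel with
  | zero => intro j; simp [bEnd]
  | succ f ih =>
    intro j
    simp only [bEnd]
    split
    · split
      · exact le_trans (Nat.le_succ j) (ih (j+1))
      · exact le_refl j
    · exact le_refl j

theorem pv_bEnd_ub (T : List Int) (n : Nat) (ti di : Int) :
    ∀ fuel j, j ≤ n → bEnd T n ti di fuel j ≤ n := by
  intro fuel
  induction fuel with
  | zero => intro j h; simpa [bEnd] using h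
  | succ f ih =>
    intro j h
    simp only [bEnd]
    split
    · split
      · exact ih (j+1) (by omega)
      · exact h
    · exact h

theorem pv_inner_eq (T D Y : List Int) (i j0 : Nat) (hj0n : j0 ≤ Y.length) (hj0T : j0 < T.length)
    (hfail : ¬(T.getD i 0 ≤ T.getD j0 0 ∧ T.getD j0 0 ≤ T.getD i 0 + D.getD i 0 + 90)) :
    ∀ fA fB j cur, j ≤ j0 → T.length ≤ fA + j → Y.length ≤ fB + j →
      aInner T D Y (T.getD i 0) (D.getD i 0) fA j cur
        = (bEnd T Y.length (T.getD i 0) (D.getD i 0) fB j,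
           cur + (pvMsum D Y (bEnd T Y.length (T.getD i 0) (D.getD i 0) fB j) - pvMsum D Y j)) := by
  intro fA
  induction fA with
  | zero => intro fB j cur hj hfA hfB; omega
  | succ f ih =>
    intro fB j cur hj hfA hfB
    have hjT : j < T.length := by omega
    have hTj : T[j]? = some (T.getD j 0) := by
      rw [List.getElem?_eq_getElem hjT, List.getD_eq_getElem _ _ hjT]
    simp only [aInner]
    split
    · next heq => rw [hTj] at heq; exact absurd heq (by simp)
    · next tj heq =>
      rw [hTj] at heq
      injection heq with heq
      subst heq
      by_cases hcond : T.getD i 0 ≤ T.getD j 0 ∧ T.getD j 0 ≤ T.getD i 0 + D.getD i 0 + 90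
      · have hjj0 : j < j0 := by
          by_contra hge
          have hjj : j = j0 := by omega
          subst hjj
          exact hfail hcond
        have hjn : j < Y.length := by omega
        match fB with
        | 0 => omega
        | Nat.succ fB' =>
          rw [if_pos hcond]
          have hB : bEnd T Y.length (T.getD i 0) (D.getD i 0) (fB'+1) j
              = bEnd T Y.length (T.getD i 0) (D.getD i 0) fB' (j+1) := by
            simp only [bEnd]
            rw [if_pos hjn, if_pos hcond]
          rw [hB, ih fB' (j+1) _ (by omega) (by omega) (by omega)]
          have hm : pvMsum D Y (j+1) = pvMsum D Y j + pvMask D Y j := by simp [pvMsum]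
          have hc : (if Y.getD j 0 = 1 then cur + D.getD j 0 else cur) = cur + pvMask D Y j := by
            simp only [pvMask]; split <;> ring
          rw [hm, hc]
          congr 1
          ring
      · rw [if_neg hcond]
        have hB : bEnd T Y.length (T.getD i 0) (D.getD i 0) fB j = j := by
          match fB with
          | 0 => rfl
          | Nat.succ fB' =>
            simp only [bEnd]
            by_cases hjn2 : j < Y.length
            · rw [if_pos hjn2, if_neg hcond]
            · rw [if_neg hjn2]
        rw [hB]
        congr 1
        ring

theorem pv_bPref_get (D Y : List Int) :
    ∀ fuel j s m, m < fuel →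
      (bPref D Y fuel j s)[m]? = some (s + (pvMsum D Y (j+m+1) - pvMsum D Y j)) := by
  intro fuel
  induction fuel with
  | zero => intro j s m h; omega
  | succ f ih =>
    intro j s m h
    match m with
    | 0 =>
      simp only [bPref, List.getElem?_cons_zero]
      have : pvMsum D Y (j+0+1) = pvMsum D Y j + pvMask D Y j := by simp [pvMsum]
      rw [this]
      simp only [pvMask]
      congr 1
      omega
    | Nat.succ m' =>
      simp only [bPref, List.getElem?_cons_succ]
      rw [ih (j+1) _ m' (by omega)]
      have h1 : pvMsum D Y (j+1) = pvMsum D Y j + pvMask D Y j := by simp [pvMsum]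
      have h2 : j + (m'+1) + 1 = j + 1 + m' + 1 := by omega
      simp only [Nat.succ_eq_add_one, h2, h1, pvMask]
      congr 1
      ring

theorem pv_pref_getD (D Y : List Int) (k : Nat) (hk : k ≤ Y.length) :
    (0 :: bPref D Y Y.length 0 0).getD k 0 = pvMsum D Y k := by
  match k with
  | 0 => simp [pvMsum]
  | Nat.succ k' =>
    have := pv_bPref_get D Y Y.length 0 0 k' (by omega)
    simp only [List.getD, List.getElem?_cons_succ]
    rw [this]
    simp [pvMsum]

theorem pv_aWrite_len (Y : List Int) :
    ∀ (l : List Nat) (out : List Int), (l.foldl (fun o k => o.set k (Y.getD k 0)) out).length = out.length := by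
  intro l
  induction l with
  | nil => intro out; rfl
  | cons x xs ih =>
    intro out
    simp only [List.foldl_cons]
    rw [ih]
    exact List.length_set ..

theorem pv_aWrite_get (Y : List Int) :
    ∀ m a (out : List Int) k,
      ((List.range' a m).foldl (fun o k => o.set k (Y.getD k 0)) out)[k]?
        = if a ≤ k ∧ k < a + m ∧ k < out.length then some (Y.getD k 0) else out[k]? := by
  intro m
  induction m with
  | zero =>
    intro a out k
    simp only [List.range'_zero, List.foldl_nil]
    rw [if_neg (by omega)]
  | succ m ih =>
    intro a out k
    rw [List.range'_succ, List.foldl_cons, ih (a+1) (out.set a (Y.getD a 0)) k]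
    simp only [List.length_set, List.getElem?_set]
    by_cases h1 : a + 1 ≤ k ∧ k < a + 1 + m ∧ k < out.length
    · rw [if_pos h1, if_pos (by omega)]
    · rw [if_neg h1]
      by_cases hak : a = k
      · subst hak
        by_cases hal : a < out.length
        · rw [if_pos rfl, if_pos hal, if_pos (by omega)]
        · rw [if_pos rfl, if_neg hal, if_neg (by omega)]
          exact (List.getElem?_eq_none (by omega)).symm
      · rw [if_neg hak, if_neg (by omega)]

theorem pv_chi_succ (T D Y : List Int) (i k : Nat) :
    pvChi T D Y (i+1) k = if pvCov T D Y i k then Y.getD k 0 else pvChi T D Y i k := by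
  simp only [pvChi, List.range_succ, List.any_append, List.any_cons, List.any_nil, Bool.or_false]
  cases hcov : pvCov T D Y i k <;>
    cases ha : (List.range i).any (fun i' => pvCov T D Y i' k) <;> simp

theorem pv_chi_ge (T D Y : List Int) (i k : Nat) (h : Y.length ≤ i) :
    pvChi T D Y i k = pvChi T D Y Y.length k := by
  simp only [pvChi]
  have : ((List.range i).any fun i' => pvCov T D Y i' k)
      = ((List.range Y.length).any fun i' => pvCov T D Y i' k) := by
    rw [Bool.eq_iff_iff]
    simp only [List.any_eq_true, List.mem_range]
    constructor
    · rintro ⟨i', _, hc⟩; exact ⟨i', pv_cov_lt hc, hc⟩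
    · rintro ⟨i', hi', hc⟩; exact ⟨i', by omega, hc⟩
  rw [this]

theorem pv_outerA (T D Y : List Int) (hpre : Pre_smooth_output T D Y) :
    ∀ fuel i (out : List Int), Y.length ≤ i + fuel → out.length = Y.length →
      (∀ k, out[k]? = if k < Y.length then some (pvChi T D Y i k) else none) →
      ∀ k, (aOuter T D Y fuel i out)[k]? = if k < Y.length then some (pvChi T D Y Y.length k) else none := by
  intro fuel
  induction fuel with
  | zero =>
    intro i out hni hlen hchar k
    simp only [aOuter]
    rw [hchar k, pv_chi_ge T D Y i k (by omega)]
  | succ f ih =>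
    intro i out hni hlen hchar k
    simp only [aOuter]
    by_cases hin : i < Y.length
    · rw [if_pos hin]
      by_cases hY : Y.getD i 0 = 1
      · rw [if_pos hY]
        obtain ⟨hiT, hiD, j0, hj0T, hij0, hj0n, hfailP⟩ := hpre i hin hY
        have hinner := pv_inner_eq T D Y i j0 hj0n hj0T hfailP
          T.length Y.length (i+1) (D.getD i 0) (by omega) (by omega) (by omega)
        rw [hinner]
        have hE : bEnd T Y.length (T.getD i 0) (D.getD i 0) Y.length (i+1) = pvE T D Y i := rfl
        rw [hE]
        have hiE : i + 1 ≤ pvE T D Y i := pv_bEnd_lb T Y.length _ _ Y.length (i+1)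
        have hEn : pvE T D Y i ≤ Y.length := pv_bEnd_ub T Y.length _ _ Y.length (i+1) (by omega)
        by_cases hq : 45 ≤ D.getD i 0 + (pvMsum D Y (pvE T D Y i) - pvMsum D Y (i+1))
        · rw [if_pos hq]
          apply ih (i+1) _ (by omega) (by unfold aWrite; rw [pv_aWrite_len]; exact hlen)
          intro k'
          unfold aWrite
          rw [pv_aWrite_get Y _ i out k', pv_chi_succ]
          by_cases hk' : i ≤ k' ∧ k' < pvE T D Y i
          · have hcov : pvCov T D Y i k' = true := by
              simp only [pvCov, Bool.and_eq_true, beq_iff_eq, decide_eq_true_eq]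
              exact ⟨⟨⟨hY, hq⟩, hk'.1⟩, hk'.2⟩
            rw [if_pos (show i ≤ k' ∧ k' < i + (pvE T D Y i - i) ∧ k' < out.length from
                  ⟨hk'.1, by omega, by omega⟩),
              if_pos (show k' < Y.length by omega), hcov, if_pos rfl]
          · have hcov : pvCov T D Y i k' = false := by
              rw [Bool.eq_false_iff]
              intro hc
              simp only [pvCov, Bool.and_eq_true, beq_iff_eq, decide_eq_true_eq] at hc
              exact hk' ⟨hc.1.2, hc.2⟩
            rw [if_neg (show ¬(i ≤ k' ∧ k' < i + (pvE T D Y i - i) ∧ k' < out.length) from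
                  fun hc => hk' ⟨hc.1, by have := hc.2.1; omega⟩),
              hchar k', hcov, if_neg Bool.false_ne_true]
        · rw [if_neg hq]
          apply ih (i+1) out (by omega) hlen
          intro k'
          have hcov : pvCov T D Y i k' = false := by
            rw [Bool.eq_false_iff]
            intro hc
            simp only [pvCov, Bool.and_eq_true, beq_iff_eq, decide_eq_true_eq] at hc
            exact hq hc.1.1.2
          rw [hchar k', pv_chi_succ, hcov, if_neg Bool.false_ne_true]
      · rw [if_neg hY]
        apply ih (i+1) out (by omega) hlen
        intro k'
        have hcov : pvCov T D Y i k' = false := by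
          rw [Bool.eq_false_iff]
          intro hc
          simp only [pvCov, Bool.and_eq_true, beq_iff_eq, decide_eq_true_eq] at hc
          exact hY hc.1.1.1
        rw [hchar k', pv_chi_succ, hcov, if_neg Bool.false_ne_true]
    · rw [if_neg hin]
      rw [hchar k, pv_chi_ge T D Y i k (by omega)]

theorem pv_altB (T D Y : List Int) :
    ∀ k, (smooth_output_alt T D Y)[k]? = if k < Y.length then some (pvChi T D Y Y.length k) else none := by
  have hfold : (List.range Y.length).foldl (fun acc i =>
      if Y.getD i 0 = 1 then
        if 45 ≤ D.getD i 0 + (0 :: bPref D Y Y.length 0 0).getD (bEnd T Y.length (T.getD i 0) (D.getD i 0) Y.length (i+1)) 0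
            - (0 :: bPref D Y Y.length 0 0).getD (i+1) 0 then
          acc ++ [(i, bEnd T Y.length (T.getD i 0) (D.getD i 0) Y.length (i+1))] else acc
      else acc) ([] : List (Nat × Nat))
      = ((List.range Y.length).filter (fun i => (Y.getD i 0 == 1) &&
          decide (45 ≤ D.getD i 0 + pvMsum D Y (pvE T D Y i) - pvMsum D Y (i+1)))).map
          (fun i => (i, pvE T D Y i)) := by
    rw [PySem.List.foldl_congr_mem' (List.range Y.length) _
      (fun acc i => if ((Y.getD i 0 == 1) &&
          decide (45 ≤ D.getD i 0 + pvMsum D Y (pvE T D Y i) - pvMsum D Y (i+1))) then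
          acc ++ [(i, pvE T D Y i)] else acc) [] ?_]
    · exact PySem.List.foldl_append_if _ _ _ _
    · intro i hi acc
      simp only [List.mem_range] at hi
      have hE : bEnd T Y.length (T.getD i 0) (D.getD i 0) Y.length (i+1) = pvE T D Y i := rfl
      have hEn : pvE T D Y i ≤ Y.length := pv_bEnd_ub T Y.length _ _ Y.length (i+1) (by omega)
      rw [hE, pv_pref_getD D Y (pvE T D Y i) hEn, pv_pref_getD D Y (i+1) (by omega)]
      by_cases h1 : Y.getD i 0 = 1
      · by_cases h2 : 45 ≤ D.getD i 0 + pvMsum D Y (pvE T D Y i) - pvMsum D Y (i+1)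
        · rw [if_pos h1, if_pos h2]
          have hcnd : ((Y.getD i 0 == 1) &&
              decide (45 ≤ D.getD i 0 + pvMsum D Y (pvE T D Y i) - pvMsum D Y (i+1))) = true := by
            simp only [Bool.and_eq_true, beq_iff_eq, decide_eq_true_eq]
            exact ⟨h1, h2⟩
          simp only [hcnd]; rfl
        · rw [if_pos h1, if_neg h2]
          have hcnd : ((Y.getD i 0 == 1) &&
              decide (45 ≤ D.getD i 0 + pvMsum D Y (pvE T D Y i) - pvMsum D Y (i+1))) = false := by
            rw [Bool.eq_false_iff]
            intro hc
            simp only [Bool.and_eq_true, beq_iff_eq, decide_eq_true_eq] at hc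
            exact h2 hc.2
          simp only [hcnd]; rfl
      · rw [if_neg h1]
        have hcnd : ((Y.getD i 0 == 1) &&
            decide (45 ≤ D.getD i 0 + pvMsum D Y (pvE T D Y i) - pvMsum D Y (i+1))) = false := by
          rw [Bool.eq_false_iff]
          intro hc
          simp only [Bool.and_eq_true, beq_iff_eq, decide_eq_true_eq] at hc
          exact h1 hc.1
        simp only [hcnd]; rfl
  intro k
  simp only [smooth_output_alt, hfold, List.getElem?_map]
  by_cases hk : k < Y.length
  · rw [List.getElem?_range hk, if_pos hk]
    simp only [Option.map_some]
    refine congrArg some ?_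
    rw [List.any_map, List.any_filter]
    simp only [pvChi]
    have hany : (List.range Y.length).any (fun x => ((Y.getD x 0 == 1) &&
          decide (45 ≤ D.getD x 0 + pvMsum D Y (pvE T D Y x) - pvMsum D Y (x+1))) &&
          ((fun p : Nat × Nat => decide (p.1 ≤ k ∧ k < p.2)) ∘ fun i => (i, pvE T D Y i)) x)
        = (List.range Y.length).any (fun i' => pvCov T D Y i' k) := by
      refine List.any_congr rfl ?_
      intro x
      rw [Bool.eq_iff_iff]
      simp only [Function.comp, pvCov, Bool.and_eq_true, beq_iff_eq, decide_eq_true_eq]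
      constructor
      · rintro ⟨⟨h1, h2⟩, h3, h4⟩; exact ⟨⟨⟨h1, by omega⟩, h3⟩, h4⟩
      · rintro ⟨⟨⟨h1, h2⟩, h3⟩, h4⟩; exact ⟨⟨h1, by omega⟩, h3, h4⟩
    rw [hany]
  · rw [if_neg hk, List.getElem?_eq_none (by simpa using hk)]
    rfl

-- ===== VERDICT (by name: the statement is the Claim_ definition above) =====
theorem smooth_output_spec : Claim_equal_smooth_output := by
  intro T D Y _hdom hpre
  unfold Spec_smooth_output smooth_output
  apply List.ext_getElem?
  intro k
  rw [pv_altB T D Y k]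
  apply pv_outerA T D Y hpre Y.length 0 _ (by omega) (by simp)
  intro k
  simp [pvChi, List.getElem?_replicate]
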